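-- pv_equiv track=rewrite | github.com/omicidx/omicidx-builder | omicidx_builder/pubmed_cli.py | fix_mesh
-- ===== SOURCE A (Python) =====
-- def fix_mesh(mesh_str: str) -> list[dict[str, str]]:
--     meshes = mesh_str.split(';')
--     ret = []
--     for mesh in meshes:
--         split_mesh = mesh.strip().split(":")
--         if len(split_mesh)<2:
--             return []
--         ret.append({
--             # include curie
--             'curie': "mesh:" + split_mesh[0],
--             'term': split_mesh[1]
--         })
--     return ret
-- ===== SOURCE B (Python) =====
-- def fix_mesh(mesh_str: str) -> list[dict[str, str]]:
--     # manual tokenizer: scan with find() and slices, no split()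
--     out = []
--     s = mesh_str
--     while True:
--         i = s.find(';')
--         head = s if i < 0 else s[:i]
--         t = head.strip()
--         j = t.find(':')
--         if j < 0:
--             return []
--         rest = t[j + 1:]
--         k = rest.find(':')
--         out.append({'curie': 'mesh:' + t[:j],
--                     'term': rest if k < 0 else rest[:k]})
--         if i < 0:
--             return out
--         s = s[i + 1:]
-- ===== Notes on version B (the rewrite author's own statement) =====
-- stated objective: alternative
-- what changed: Replaces A's two-level split loop (split into chunks, split each chunk again, accumulate dicts) with a manual tokenizer: one scan over the remaining suffix using find() and slicing, no split calls at all.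
import Mathlib
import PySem

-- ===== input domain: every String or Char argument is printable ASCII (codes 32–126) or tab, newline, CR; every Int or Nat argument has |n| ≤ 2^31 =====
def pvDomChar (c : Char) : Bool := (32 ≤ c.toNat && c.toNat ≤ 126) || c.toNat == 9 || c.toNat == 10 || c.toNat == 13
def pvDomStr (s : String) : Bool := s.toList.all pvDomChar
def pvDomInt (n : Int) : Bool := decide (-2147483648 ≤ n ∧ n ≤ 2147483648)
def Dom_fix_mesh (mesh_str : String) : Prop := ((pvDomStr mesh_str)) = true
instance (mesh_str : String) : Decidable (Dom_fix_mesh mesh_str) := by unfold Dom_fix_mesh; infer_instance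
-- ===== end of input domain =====

-- B replaces A's split-into-chunks / split-each-chunk-on-':' loop by a manual
-- tokenizer: a single scan over the remaining suffix with find() and slices,
-- never calling split (objective: alternative).

-- ===== PORT A =====
-- s.split(sep) for a nonempty literal sep (split? is none only for sep = "").
def pySplit (s sep : String) : List String := (PySem.Str.split? s sep).getD []

-- A's loop: early-return [] on a bad chunk, else accumulate and reverse at the end.
def fixMeshLoop : List String → List (List (String × String)) → List (List (String × String))
  | [], ret => ret.reverse
  | mesh :: rest, ret =>
    let split_mesh := pySplit (PySem.Str.strip mesh) ":"
    if split_mesh.length < 2 then []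
    else fixMeshLoop rest
      ([("curie", "mesh:" ++ PySem.List.pyGetD split_mesh 0 ""),
        ("term", PySem.List.pyGetD split_mesh 1 "")] :: ret)

def fix_mesh (mesh_str : String) : List (List (String × String)) :=
  fixMeshLoop (pySplit mesh_str ";") []

-- ===== PORT B =====
-- needed for termination of the scan: a found single-char pattern sits at an index < length
lemma pvFindLtLen (c : Char) (s : List Char) (h : 0 ≤ PySem.Chars.find s [c]) :
    (PySem.Chars.find s [c]).toNat < s.length := by
  obtain ⟨hp, _⟩ := PySem.Chars.find_spec h
  obtain ⟨t, ht⟩ := hp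
  by_contra hge
  push_neg at hge
  rw [List.drop_eq_nil_of_le hge] at ht
  simp at ht

-- Source B's while loop: s shrinks to the suffix after the first ';' each turn;
-- find/strip/slices on the String are the PySem List Char primitives, so the
-- scan recurses over mesh_str.toList.
def meshScanB (s : List Char) (out : List (List (String × String))) :
    List (List (String × String)) :=
  let i := PySem.Chars.find s [';']
  let head := if i < 0 then s else PySem.List.slice s none (some i)
  let t := PySem.Chars.strip head
  let j := PySem.Chars.find t [':']
  if j < 0 then []
  else
    let rest := PySem.List.slice t (some (j + 1)) none
    let k := PySem.Chars.find rest [':']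
    let out' := out ++
      [[("curie", "mesh:" ++ String.ofList (PySem.List.slice t none (some j))),
        ("term", String.ofList (if k < 0 then rest else PySem.List.slice rest none (some k)))]]
    if h : i < 0 then out'
    else meshScanB (PySem.List.slice s (some (i + 1)) none) out'
termination_by s.length
decreasing_by
  have h0 : 0 ≤ PySem.Chars.find s [';'] := by omega
  have hlt := pvFindLtLen ';' s h0
  rw [PySem.List.slice_from s (by omega : (0:Int) ≤ PySem.Chars.find s [';'] + 1)]
  simp only [List.length_drop]
  omega

def fix_mesh_alt (mesh_str : String) : List (List (String × String)) :=
  meshScanB mesh_str.toList []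

-- ===== PRECONDITION & SPEC =====
def Spec_fix_mesh (mesh_str : String) (out : List (List (String × String))) : Prop := out = fix_mesh_alt mesh_str
instance (mesh_str : String) (out : List (List (String × String))) : Decidable (Spec_fix_mesh mesh_str out) := by unfold Spec_fix_mesh; infer_instance

-- ===== CLAIM (what is proved, stated in full; the proofs are below) =====
def Claim_equal_fix_mesh : Prop := ∀ (mesh_str : String), Dom_fix_mesh mesh_str → Spec_fix_mesh mesh_str (fix_mesh mesh_str)

-- ===== LEMMAS AND PROOFS =====

-- splitting on one character, structurally
def sp (c : Char) : List Char → List (List Char)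
  | [] => [[]]
  | x :: xs => if x = c then [] :: sp c xs
               else match sp c xs with
                 | [] => [[x]]
                 | h :: t => (x :: h) :: t

def consHead (p : List Char) : List (List Char) → List (List Char)
  | [] => [p]
  | h :: t => (p ++ h) :: t

lemma sp_ne_nil (c : Char) (l : List Char) : sp c l ≠ [] := by
  cases l with
  | nil => simp [sp]
  | cons x xs =>
    simp only [sp]
    split
    · simp
    · split <;> simp

lemma go_inv (c : Char) (l : List Char) : ∀ (fuel : Nat) (cur : List Char) (acc : List (List Char)),
    l.length ≤ fuel →
    PySem.Chars.splitOn.go [c] fuel l cur acc = acc.reverse ++ consHead cur.reverse (sp c l) := by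
  induction l with
  | nil =>
    intro fuel cur acc _
    cases fuel <;> simp [PySem.Chars.splitOn.go, consHead, sp]
  | cons x xs ih =>
    intro fuel cur acc h
    cases fuel with
    | zero => simp at h
    | succ f =>
      simp only [PySem.Chars.splitOn.go]
      by_cases hx : x = c
      · subst hx
        have hpre : [x].isPrefixOf (x :: xs) = true := by simp [List.isPrefixOf]
        rw [if_pos hpre]
        simp only [List.length_singleton, List.drop_one, List.tail_cons]
        simp only [List.length_cons] at h
        rw [ih f [] (cur.reverse :: acc) (by omega)]
        simp [sp]
        cases hsp : sp x xs with
        | nil => exact absurd hsp (sp_ne_nil x xs)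
        | cons hh tt => simp [consHead]
      · have hpre : [c].isPrefixOf (x :: xs) = false := by
          simp [List.isPrefixOf]; intro hc; exact absurd hc.symm hx
        rw [if_neg (by simp [hpre])]
        simp only [List.length_cons] at h
        rw [ih f (x :: cur) acc (by omega)]
        simp only [sp]
        rw [if_neg hx]
        cases hsp : sp c xs with
        | nil => exact absurd hsp (sp_ne_nil c xs)
        | cons hh tt => simp [consHead]

lemma splitOn_single (c : Char) (s : List Char) :
    PySem.Chars.splitOn s [c] = sp c s := by
  have h := go_inv c s (s.length + 1) [] [] (by omega)
  rw [PySem.Chars.splitOn, h]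
  cases hsp : sp c s with
  | nil => exact absurd hsp (sp_ne_nil c s)
  | cons a b => simp [consHead]

lemma find_single_neg (c : Char) (cs : List Char) :
    PySem.Chars.find cs [c] < 0 ↔ c ∉ cs := by
  constructor
  · intro h hm
    have h1 : PySem.Chars.find cs [c] = -1 := by
      have := PySem.Chars.neg_one_le_find cs [c]; omega
    rw [PySem.Chars.find_eq_neg_one_iff] at h1
    obtain ⟨l1, l2, rfl⟩ := List.append_of_mem hm
    exact h1 ⟨l1, l2, by simp⟩
  · intro h
    by_contra hge
    push_neg at hge
    obtain ⟨hp, _⟩ := PySem.Chars.find_spec hge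
    obtain ⟨t, ht⟩ := hp
    exact h (List.mem_of_mem_drop (l := cs) (by rw [← ht]; simp))

lemma sp_no_occ (c : Char) (cs : List Char) (h : c ∉ cs) : sp c cs = [cs] := by
  induction cs with
  | nil => rfl
  | cons x xs ih =>
    simp only [List.mem_cons, not_or] at h
    rw [sp, if_neg (fun hx => h.1 hx.symm), ih h.2]

lemma sp_occ (c : Char) (xs ys : List Char) (h : c ∉ xs) :
    sp c (xs ++ c :: ys) = xs :: sp c ys := by
  induction xs with
  | nil => simp [sp]
  | cons a as ih =>
    simp only [List.mem_cons, not_or] at h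
    simp only [List.cons_append, sp, ih h.2]
    rw [if_neg (fun hx => h.1 hx.symm)]

lemma find_decomp (c : Char) (cs : List Char) (h : 0 ≤ PySem.Chars.find cs [c]) :
    cs = cs.take (PySem.Chars.find cs [c]).toNat ++ c :: cs.drop ((PySem.Chars.find cs [c]).toNat + 1) ∧
    c ∉ cs.take (PySem.Chars.find cs [c]).toNat := by
  set n := (PySem.Chars.find cs [c]).toNat with hn_def
  obtain ⟨hp, hmin⟩ := PySem.Chars.find_spec h
  obtain ⟨t, ht⟩ := hp
  have hn : n < cs.length := pvFindLtLen c cs h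
  have hd := List.drop_eq_getElem_cons hn
  rw [hd] at ht
  have hget : cs[n] = c := by
    have h2 := congrArg List.head? ht
    simp at h2
    rw [List.getElem?_eq_getElem hn] at h2
    exact (Option.some_inj.mp h2).symm
  refine ⟨?_, ?_⟩
  · conv_lhs => rw [← List.take_append_drop n cs]
    rw [hd]
    rw [hget]
  · intro hmem
    obtain ⟨i, hi, hci⟩ := List.getElem_of_mem hmem
    have hin : i < n := by
      have := hi; simp [List.length_take] at this; omega
    have hci2 : cs[i]'(by omega) = c := by
      rw [List.getElem_take] at hci
      exact hci
    exact hmin i hin ⟨cs.drop (i + 1), by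
      rw [List.drop_eq_getElem_cons (by omega : i < cs.length), hci2]; rfl⟩

-- sp written with find: either no occurrence, or split at the first one
lemma sp_of_find_neg (c : Char) (cs : List Char) (h : PySem.Chars.find cs [c] < 0) :
    sp c cs = [cs] :=
  sp_no_occ c cs ((find_single_neg c cs).mp h)

lemma sp_of_find_nonneg (c : Char) (cs : List Char) (h : 0 ≤ PySem.Chars.find cs [c]) :
    sp c cs = cs.take (PySem.Chars.find cs [c]).toNat ::
      sp c (cs.drop ((PySem.Chars.find cs [c]).toNat + 1)) := by
  obtain ⟨hdec, hnm⟩ := find_decomp c cs h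
  conv_lhs => rw [hdec]
  exact sp_occ c _ _ hnm

-- the entry both programs build from the ':'-parts of a stripped chunk
def entryC (p : List (List Char)) : List (String × String) :=
  [("curie", "mesh:" ++ String.ofList (p.getD 0 [])),
   ("term", String.ofList (p.getD 1 []))]

-- the ':'-parts of one raw chunk
def chunkParts (m : List Char) : List (List Char) := sp ':' (PySem.Chars.strip m)

-- a stripped chunk has fewer than two ':'-parts exactly when it has no ':'
lemma parts_short_iff (t : List Char) :
    (sp ':' t).length < 2 ↔ PySem.Chars.find t [':'] < 0 := by
  by_cases hj : PySem.Chars.find t [':'] < 0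
  · rw [sp_of_find_neg ':' t hj]; simp [hj]
  · rw [sp_of_find_nonneg ':' t (by omega)]
    simp only [List.length_cons, hj, iff_false]
    have := sp_ne_nil ':' (t.drop ((PySem.Chars.find t [':']).toNat + 1))
    cases hsp : sp ':' (t.drop ((PySem.Chars.find t [':']).toNat + 1)) with
    | nil => exact absurd hsp this
    | cons a b => simp

-- the entry B builds from a chunk with at least one ':' is entryC of its parts
lemma chunk_entry (t : List Char) (hj : ¬ PySem.Chars.find t [':'] < 0) :
    entryC (sp ':' t) =
      [("curie", "mesh:" ++ String.ofList (PySem.List.slice t none (some (PySem.Chars.find t [':'])))),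
       ("term", String.ofList (
          if PySem.Chars.find (PySem.List.slice t (some (PySem.Chars.find t [':'] + 1)) none) [':'] < 0
          then PySem.List.slice t (some (PySem.Chars.find t [':'] + 1)) none
          else PySem.List.slice (PySem.List.slice t (some (PySem.Chars.find t [':'] + 1)) none) none
            (some (PySem.Chars.find (PySem.List.slice t (some (PySem.Chars.find t [':'] + 1)) none) [':'])))) ] := by
  have h0 : (0:Int) ≤ PySem.Chars.find t [':'] := by omega
  have hrest : PySem.List.slice t (some (PySem.Chars.find t [':'] + 1)) none
      = t.drop ((PySem.Chars.find t [':']).toNat + 1) := by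
    rw [PySem.List.slice_from t (by omega : (0:Int) ≤ PySem.Chars.find t [':'] + 1)]
    congr 1
    omega
  rw [sp_of_find_nonneg ':' t h0]
  rw [PySem.List.slice_to t h0, hrest]
  set r := t.drop ((PySem.Chars.find t [':']).toNat + 1) with hr
  rw [entryC]
  simp only [List.getD_cons_zero, List.getD_cons_succ]
  by_cases hk : PySem.Chars.find r [':'] < 0
  · rw [sp_of_find_neg ':' r hk]
    simp [hk]
  · rw [sp_of_find_nonneg ':' r (by omega)]
    rw [PySem.List.slice_to r (by omega : (0:Int) ≤ PySem.Chars.find r [':'])]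
    simp [hk]


-- B's closed form
lemma meshScanB_eq : ∀ (fuel : Nat) (s : List Char) (out : List (List (String × String))),
    s.length ≤ fuel →
    meshScanB s out =
      if ((sp ';' s).map chunkParts).any (fun p => decide (p.length < 2)) then []
      else out ++ ((sp ';' s).map chunkParts).map entryC := by
  intro fuel
  induction fuel with
  | zero =>
    intro s out h
    have hs : s = [] := List.eq_nil_of_length_eq_zero (by omega)
    subst hs
    rw [meshScanB.eq_def]
    simp only []
    norm_num [show PySem.Chars.find ([]:List Char) [';'] = -1 from rfl,
              show PySem.Chars.strip ([]:List Char) = [] from rfl,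
              show PySem.Chars.find ([]:List Char) [':'] = -1 from rfl,
              sp, chunkParts]
  | succ f ih =>
    intro s out h
    rw [meshScanB.eq_def]
    simp only []
    by_cases hi : PySem.Chars.find s [';'] < 0
    · rw [sp_of_find_neg ';' s hi]
      simp only [hi, if_true, List.map_cons, List.map_nil, List.any_cons, List.any_nil,
        Bool.or_false]
      by_cases hj : PySem.Chars.find (PySem.Chars.strip s) [':'] < 0
      · have hshort : (sp ':' (PySem.Chars.strip s)).length < 2 := (parts_short_iff _).mpr hj
        simp [hj, chunkParts]
        omega
      · have hlen : ¬ (sp ':' (PySem.Chars.strip s)).length < 2 := by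
          rw [parts_short_iff]; exact hj
        rw [if_neg hj]
        simp only [dite_true]
        simp only [chunkParts]
        rw [chunk_entry (PySem.Chars.strip s) hj]
        simp [hlen]
    · have h0 : (0:Int) ≤ PySem.Chars.find s [';'] := by omega
      have hpos := pvFindLtLen ';' s h0
      have hslice_head : PySem.List.slice s none (some (PySem.Chars.find s [';'])) =
          s.take (PySem.Chars.find s [';']).toNat := PySem.List.slice_to s h0
      have hslice_tail : PySem.List.slice s (some (PySem.Chars.find s [';'] + 1)) none =
          s.drop ((PySem.Chars.find s [';']).toNat + 1) := by
        rw [PySem.List.slice_from s (by omega : (0:Int) ≤ PySem.Chars.find s [';'] + 1)]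
        congr 1
        omega
      rw [sp_of_find_nonneg ';' s h0]
      simp only [hi, if_false, List.map_cons, List.any_cons, hslice_head, hslice_tail]
      by_cases hj : PySem.Chars.find
          (PySem.Chars.strip (s.take (PySem.Chars.find s [';']).toNat)) [':'] < 0
      · have hshort : (sp ':' (PySem.Chars.strip (s.take (PySem.Chars.find s [';']).toNat))).length < 2 :=
          (parts_short_iff _).mpr hj
        simp [hj, chunkParts]
        omega
      · have hlen : ¬ (sp ':' (PySem.Chars.strip (s.take (PySem.Chars.find s [';']).toNat))).length < 2 := by
          rw [parts_short_iff]; exact hj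
        rw [if_neg hj]
        simp only [dite_false]
        rw [ih _ _ (by simp only [List.length_drop]; omega)]
        have hfirst : decide ((chunkParts (List.take (PySem.Chars.find s [';']).toNat s)).length < 2) = false := by
          simpa [chunkParts] using hlen
        rw [hfirst]
        simp only [Bool.false_or]
        by_cases hrest : ((List.map chunkParts (sp ';' (List.drop ((PySem.Chars.find s [';']).toNat + 1) s))).any
            fun p => decide (p.length < 2)) = true
        · rw [if_pos hrest, if_pos hrest]
        · rw [if_neg hrest, if_neg hrest]
          simp only [chunkParts]
          rw [chunk_entry _ hj]
          simp

-- A's closed form over its string chunk list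
lemma fixMeshLoop_eq (cs : List String) (acc : List (List (String × String))) :
    fixMeshLoop cs acc =
      if (cs.map (fun m => pySplit (PySem.Str.strip m) ":")).any
          (fun p => decide (p.length < 2)) then []
      else acc.reverse ++
        (cs.map (fun m => pySplit (PySem.Str.strip m) ":")).map
          (fun p => [("curie", "mesh:" ++ PySem.List.pyGetD p 0 ""),
                     ("term", PySem.List.pyGetD p 1 "")]) := by
  induction cs generalizing acc with
  | nil => simp [fixMeshLoop]
  | cons m rest ih =>
    by_cases h1 : (pySplit (PySem.Str.strip m) ":").length < 2 <;>
      simp [fixMeshLoop, h1, ih]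
    · intro h; omega
    · have h2 : ¬ (pySplit (PySem.Str.strip m) ":").length ≤ 1 := by omega
      simp [h2]

-- pySplit by a one-character separator, down at the char level
lemma pySplit_single (u : String) (c : Char) (sep : String) (hsep : sep.toList = [c]) :
    pySplit u sep = (sp c u.toList).map String.ofList := by
  have hb := PySem.Str.split?_map u sep
  rw [hsep, PySem.Chars.split?] at hb
  simp only [List.isEmpty_cons, if_false, Bool.false_eq_true] at hb
  rw [splitOn_single] at hb
  cases hs : PySem.Str.split? u sep with
  | none => rw [hs] at hb; simp at hb
  | some L =>
    rw [hs] at hb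
    simp only [Option.map_some, Option.some_inj] at hb
    rw [pySplit, hs, Option.getD_some]
    calc L = (L.map String.toList).map String.ofList := by
            simp [List.map_map, Function.comp_def]
      _ = (sp c u.toList).map String.ofList := by rw [hb]

-- A's dict entry over string parts is entryC of the char-level parts
lemma meshEntry_bridge (p : List (List Char)) :
    [(("curie" : String), "mesh:" ++ PySem.List.pyGetD (p.map String.ofList) 0 ""),
     (("term" : String), PySem.List.pyGetD (p.map String.ofList) 1 "")] = entryC p := by
  have h0 : ("" : String) = String.ofList [] := rfl
  rw [entryC, h0, PySem.List.pyGetD_map, PySem.List.pyGetD_map]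
  simp [PySem.List.pyGetD_zero, PySem.List.pyGetD_ofNat']

-- ===== VERDICT (by name: the statement is the Claim_ definition above) =====
theorem fix_mesh_spec : Claim_equal_fix_mesh := by
  intro s _
  unfold Spec_fix_mesh fix_mesh fix_mesh_alt
  rw [fixMeshLoop_eq, meshScanB_eq s.toList.length s.toList [] le_rfl]
  rw [pySplit_single s ';' ";" (by decide)]
  have hf : ∀ q : List Char, pySplit (PySem.Str.strip (String.ofList q)) ":"
      = (sp ':' (PySem.Chars.strip q)).map String.ofList := by
    intro q
    rw [pySplit_single (PySem.Str.strip (String.ofList q)) ':' ":" (by decide)]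
    rw [PySem.Str.toList_strip, String.toList_ofList]
  simp only [List.map_map, Function.comp_def, hf]
  simp [chunkParts, meshEntry_bridge, List.any_map, Function.comp_def]
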